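-- pv_equiv track=rewrite | github.com/Bamlaku667/ds_practice | algorithms/sliding_window/find_index.py | findIndexofZero
-- ===== SOURCE A (Python) =====
-- def findIndexofZero(arr) -> int:
--     max_index = -1
--     left = 0
--     right = 0
--     max_len = 0
--     count = 0
--     prev_zero_index = -1
--
--     for right in range(len(arr)):
--         if arr[right] == 0:
--             prev_zero_index = right
--             count += 1
--
--         if count == 2:
--             while arr[left]:
--                 left += 1
--             left  += 1
--             count = 1
--
--
--         if right - left + 1 > max_len:
--             max_len = max(max_len, right - left + 1)
--             max_index = prev_zero_index
--
--     return max_index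
-- ===== SOURCE B (Python) =====
-- def findIndexofZero(arr) -> int:
--     max_index = -1
--     max_len = 0
--     prev_zero = -1
--     prev_prev_zero = -1
--     for right, x in enumerate(arr):
--         if x == 0:
--             prev_prev_zero = prev_zero
--             prev_zero = right
--         if right - prev_prev_zero > max_len:
--             max_len = right - prev_prev_zero
--             max_index = prev_zero
--     return max_index
-- ===== Notes on version B (the rewrite author's own statement) =====
-- stated objective: simpler
-- what changed: B drops A's left pointer, zero count and inner while-loop rescans, instead tracking only the last two zero positions in one plain pass (window length = right - prev_prev_zero).
import Mathlib
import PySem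

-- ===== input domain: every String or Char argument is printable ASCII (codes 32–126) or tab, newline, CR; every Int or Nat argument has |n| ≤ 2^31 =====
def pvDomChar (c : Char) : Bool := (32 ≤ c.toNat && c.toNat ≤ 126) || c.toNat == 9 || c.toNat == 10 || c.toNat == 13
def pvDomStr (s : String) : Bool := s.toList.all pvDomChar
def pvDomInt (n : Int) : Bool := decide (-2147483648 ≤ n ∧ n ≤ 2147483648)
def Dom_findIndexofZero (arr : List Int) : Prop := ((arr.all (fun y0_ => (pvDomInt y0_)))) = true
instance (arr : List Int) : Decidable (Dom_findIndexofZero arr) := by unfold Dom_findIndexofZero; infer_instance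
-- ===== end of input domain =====

-- B replaces A's left pointer, zero count and inner while-loop rescan by tracking only the
-- last two zero positions in one plain pass; objective: simpler.

-- ===== PORT A =====

structure StA where
  maxIndex : Int
  left : Int
  maxLen : Int
  count : Int
  prev : Int
deriving Repr, DecidableEq

def whileLeft (arr : List Int) (left : Int) : Int :=
  if h : 0 ≤ left ∧ left.toNat < arr.length ∧ arr.getD left.toNat 0 ≠ 0 then
    whileLeft arr (left + 1)
  else left
termination_by arr.length - left.toNat
decreasing_by
  have h1 : (left + 1).toNat = left.toNat + 1 := by omega
  omega

def stepA (arr : List Int) (s : StA) (right : Int) : StA :=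
  let s1 := if PySem.List.pyGetD arr right 0 = 0 then
              { s with prev := right, count := s.count + 1 } else s
  let s2 := if s1.count = 2 then
              { s1 with left := whileLeft arr s1.left + 1, count := 1 } else s1
  if right - s2.left + 1 > s2.maxLen then
    { s2 with maxLen := max s2.maxLen (right - s2.left + 1), maxIndex := s2.prev }
  else s2

def findIndexofZero (arr : List Int) : Int :=
  ((PySem.List.pyRange 0 (arr.length : Int) 1).foldl (stepA arr) ⟨-1, 0, 0, 0, -1⟩).maxIndex

-- ===== PORT B =====

structure StB where
  maxIndex : Int
  maxLen : Int
  p : Int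
  pp : Int
deriving Repr, DecidableEq

def stepB (s : StB) (px : Int × Int) : StB :=
  let s1 := if px.2 = 0 then { s with pp := s.p, p := px.1 } else s
  if px.1 - s1.pp > s1.maxLen then
    { s1 with maxLen := px.1 - s1.pp, maxIndex := s1.p }
  else s1

def findIndexofZero_alt (arr : List Int) : Int :=
  ((PySem.List.enumerate arr 0).foldl stepB ⟨-1, 0, -1, -1⟩).maxIndex

-- ===== PRECONDITION & SPEC =====
def Spec_findIndexofZero (arr : List Int) (out : Int) : Prop := out = findIndexofZero_alt arr
instance (arr : List Int) (out : Int) : Decidable (Spec_findIndexofZero arr out) := by unfold Spec_findIndexofZero; infer_instance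

-- ===== CLAIM (what is proved, stated in full; the proofs are below) =====
def Claim_equal_findIndexofZero : Prop := ∀ (arr : List Int), Dom_findIndexofZero arr → Spec_findIndexofZero arr (findIndexofZero arr)

-- ===== LEMMAS AND PROOFS =====

-- the coupling invariant between A's and B's loop states after processing indices [0, n)
def InvAB (arr : List Int) (n : Nat) (a : StA) (b : StB) : Prop :=
  a.maxIndex = b.maxIndex ∧ a.maxLen = b.maxLen ∧ a.prev = b.p ∧
  a.left = b.pp + 1 ∧
  a.count = (if b.p = -1 then 0 else 1) ∧
  -1 ≤ b.pp ∧ b.p < (n : Int) ∧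
  (b.p = -1 → b.pp = -1) ∧
  (b.p ≠ -1 → b.pp < b.p ∧ 0 ≤ b.p ∧ arr.getD b.p.toNat 0 = 0) ∧
  (∀ j : Nat, b.pp < (j : Int) → (j : Int) < (n : Int) → (j : Int) ≠ b.p → arr.getD j 0 ≠ 0)

-- the while loop walks from start up to the first zero, which sits at index p
lemma whileLeft_eq (arr : List Int) (p : Int) :
    ∀ start : Int, 0 ≤ start → start ≤ p → p.toNat < arr.length →
    arr.getD p.toNat 0 = 0 →
    (∀ j : Nat, start ≤ (j : Int) → (j : Int) < p → arr.getD j 0 ≠ 0) →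
    whileLeft arr start = p := by
  intro start h0 hsp hplen hp0 hmid
  by_cases heq : start = p
  · subst heq
    rw [whileLeft, dif_neg (fun hc => hc.2.2 hp0)]
  · have hlt : start < p := lt_of_le_of_ne hsp heq
    have hst : start.toNat < arr.length := by omega
    have hnz : arr.getD start.toNat 0 ≠ 0 := hmid start.toNat (by omega) (by omega)
    rw [whileLeft, dif_pos ⟨h0, hst, hnz⟩]
    exact whileLeft_eq arr p (start + 1) (by omega) (by omega) hplen hp0
      (fun j hj1 hj2 => hmid j (by omega) hj2)
termination_by start => (p - start).toNat
decreasing_by omega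

lemma inv_step (arr : List Int) (n : Nat) (hn : n < arr.length) (a : StA) (b : StB)
    (h : InvAB arr n a b) :
    InvAB arr (n + 1) (stepA arr a (n : Int)) (stepB b ((n : Int), arr[n])) := by
  obtain ⟨ami, alf, aml, act, apv⟩ := a
  obtain ⟨bmi, bml, bp, bpp⟩ := b
  obtain ⟨hmi, hml, hpv, hlf, hct, hpp1, hpn, hpm1, hpnz, hall⟩ := h
  simp only at hmi hml hpv hlf hct hpp1 hpn hpm1 hpnz hall
  subst ami alf aml act apv
  have hget : PySem.List.pyGetD arr (n : Int) 0 = arr.getD n 0 := PySem.List.pyGetD_natCast arr n 0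
  have hgetd : arr.getD n 0 = arr[n] := List.getD_eq_getElem arr 0 hn
  have htn : ((n : Int)).toNat = n := Int.toNat_natCast n
  have hz2 : arr[n]? = some arr[n] := List.getElem?_eq_getElem hn
  by_cases hz : arr[n] = 0
  · by_cases hp1 : bp = -1
    · have hppm1 : bpp = -1 := hpm1 hp1
      subst hp1 hppm1
      simp only [stepA, stepB]
      norm_num [hz2, hz]
      split_ifs with hc <;> (unfold InvAB; dsimp only) <;>
        refine ⟨rfl, ?_, rfl, by norm_num, (if_neg (by omega)).symm, le_refl _,
          by push_cast; omega, fun h => absurd h (by omega), fun _ => ⟨by omega, by omega, by rw [htn, hgetd, hz]⟩, ?_⟩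
      · exact max_eq_right (by omega)
      · intro j h1 h2 h3
        exact hall j h1 (by omega) (by omega)
      · rfl
      · intro j h1 h2 h3
        exact hall j h1 (by omega) (by omega)
    · obtain ⟨hplt, hp0, hpz⟩ := hpnz hp1
      have hw : whileLeft arr (bpp + 1) = bp :=
        whileLeft_eq arr bp (bpp + 1) (by omega) (by omega) (by omega) hpz
          (fun j hj1 hj2 => hall j (by omega) (by omega) (by omega))
      simp only [stepA, stepB]
      norm_num [hz2, hz, hp1, hw]
      by_cases h1 : bml < (n : Int) - bp
      · rw [if_pos (show bml ≤ (n : Int) - (bp + 1) by omega), if_pos h1]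
        unfold InvAB; dsimp only
        refine ⟨rfl, by omega, rfl, rfl, (if_neg (by omega)).symm, by omega, by push_cast; omega,
          fun h => absurd h (by omega), fun _ => ⟨by omega, by omega, by rw [htn, hgetd, hz]⟩, ?_⟩
        intro j hj1 hj2 hj3
        exact hall j (by omega) (by omega) (by omega)
      · rw [if_neg (show ¬ bml ≤ (n : Int) - (bp + 1) by omega), if_neg h1]
        unfold InvAB; dsimp only
        refine ⟨rfl, rfl, rfl, rfl, (if_neg (by omega)).symm, by omega, by push_cast; omega,
          fun h => absurd h (by omega), fun _ => ⟨by omega, by omega, by rw [htn, hgetd, hz]⟩, ?_⟩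
        intro j hj1 hj2 hj3
        exact hall j (by omega) (by omega) (by omega)
  · have hcne : (if bp = -1 then (0:Int) else 1) ≠ 2 := by split_ifs <;> norm_num
    simp only [stepA, stepB]
    norm_num [hz2, hz, hcne]
    have hstep : ∀ j : ℕ, bpp < (j : Int) → (j : Int) < ((n:Nat) + 1 : Int) → (j : Int) ≠ bp → arr.getD j 0 ≠ 0 := by
      intro j hj1 hj2 hj3
      by_cases hjn : j = n
      · subst hjn; rw [hgetd]; exact hz
      · exact hall j hj1 (by omega) hj3
    by_cases h1 : bml < (n : Int) - bpp
    · rw [if_pos (show bml ≤ (n : Int) - (bpp + 1) by omega), if_pos h1]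
      unfold InvAB; dsimp only
      refine ⟨rfl, by omega, rfl, rfl, rfl, hpp1, by push_cast; omega, hpm1, hpnz, ?_⟩
      intro j hj1 hj2 hj3
      exact hstep j hj1 (by push_cast at hj2; omega) hj3
    · rw [if_neg (show ¬ bml ≤ (n : Int) - (bpp + 1) by omega), if_neg h1]
      unfold InvAB; dsimp only
      refine ⟨rfl, rfl, rfl, rfl, rfl, hpp1, by push_cast; omega, hpm1, hpnz, ?_⟩
      intro j hj1 hj2 hj3
      exact hstep j hj1 (by push_cast at hj2; omega) hj3

lemma inv_fold (arr : List Int) : ∀ n : Nat, n ≤ arr.length →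
    InvAB arr n ((PySem.List.pyRange 0 (n : Int) 1).foldl (stepA arr) ⟨-1, 0, 0, 0, -1⟩)
      ((PySem.List.enumerate (arr.take n) 0).foldl stepB ⟨-1, 0, -1, -1⟩) := by
  intro n
  induction n with
  | zero =>
    intro _
    simp only [Nat.cast_zero, PySem.List.pyRange_one_eq_nil (le_refl 0), List.take_zero,
      PySem.List.enumerate_nil, List.foldl_nil]
    refine ⟨rfl, rfl, rfl, rfl, rfl, le_refl _, by norm_num, fun _ => rfl, fun h => absurd rfl h, ?_⟩
    intro j hj1 hj2 hj3
    exact absurd hj2 (by omega)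
  | succ n ih =>
    intro hle
    have hn : n < arr.length := by omega
    have hr : PySem.List.pyRange 0 ((n + 1 : Nat) : Int) 1
        = PySem.List.pyRange 0 (n : Int) 1 ++ [(n : Int)] := by
      push_cast
      exact PySem.List.pyRange_one_succ_right (by omega)
    have ht : arr.take (n + 1) = arr.take n ++ [arr[n]] := List.take_succ_eq_append_getElem hn
    have hlen : (arr.take n).length = n := by simp [List.length_take]; omega
    have he : PySem.List.enumerate (arr.take (n + 1)) 0
        = PySem.List.enumerate (arr.take n) 0 ++ [((n : Int), arr[n])] := by
      rw [ht, PySem.List.enumerate_append, hlen]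
      simp [PySem.List.enumerate_cons, PySem.List.enumerate_nil]
    rw [hr, he, List.foldl_append, List.foldl_append, List.foldl_cons, List.foldl_nil,
      List.foldl_cons, List.foldl_nil]
    exact inv_step arr n hn _ _ (ih (by omega))

-- ===== VERDICT (by name: the statement is the Claim_ definition above) =====
theorem findIndexofZero_spec : Claim_equal_findIndexofZero := by
  intro arr _
  unfold Spec_findIndexofZero
  have h := inv_fold arr arr.length (le_refl _)
  rw [List.take_length] at h
  exact h.1
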